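-- pv_equiv track=rewrite | github.com/Paul-R57/TD-Python | td1/TD1.py | possible_words_list
-- ===== SOURCE A (Python) =====
-- def possible_words_list(list_letters,words_list):
--     possible_words_list = []
--
--     for word in words_list:
--
--         word_letters = list(word)
--
--         for letter in list_letters:
--             if letter in word_letters:
--                 word_letters.remove(letter)
--
--
--         if word_letters == []:
--             possible_words_list.append(word)
--
--         # if there is one letter remaining in the word that we can't write
--         # and we have a joker, the word is writeable
--         elif (len(word_letters) == 1) and ('?' in list_letters):
--             possible_words_list.append(word)
--
--     return possible_words_list
-- ===== SOURCE B (Python) =====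
-- def possible_words_list(list_letters, words_list):
--     # Count the available letters once, then charge each word's characters
--     # against a fresh copy of those counts in a single pass per word.
--     avail = {}
--     for letter in list_letters:
--         avail[letter] = avail.get(letter, 0) + 1
--     joker = '?' in list_letters
--     result = []
--     for word in words_list:
--         remaining = dict(avail)
--         uncovered = 0
--         for ch in word:
--             r = remaining.get(ch, 0)
--             if r > 0:
--                 remaining[ch] = r - 1
--             else:
--                 uncovered += 1
--         if uncovered == 0 or (uncovered == 1 and joker):
--             result.append(word)
--     return result
-- ===== Notes on version B (the rewrite author's own statement) =====
-- stated objective: faster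
-- what changed: Replaces the per-word scan over list_letters with repeated list.remove by a letter-count dictionary built once, charging each word's characters against a copy of the counts in a single pass per word.
import Mathlib
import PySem

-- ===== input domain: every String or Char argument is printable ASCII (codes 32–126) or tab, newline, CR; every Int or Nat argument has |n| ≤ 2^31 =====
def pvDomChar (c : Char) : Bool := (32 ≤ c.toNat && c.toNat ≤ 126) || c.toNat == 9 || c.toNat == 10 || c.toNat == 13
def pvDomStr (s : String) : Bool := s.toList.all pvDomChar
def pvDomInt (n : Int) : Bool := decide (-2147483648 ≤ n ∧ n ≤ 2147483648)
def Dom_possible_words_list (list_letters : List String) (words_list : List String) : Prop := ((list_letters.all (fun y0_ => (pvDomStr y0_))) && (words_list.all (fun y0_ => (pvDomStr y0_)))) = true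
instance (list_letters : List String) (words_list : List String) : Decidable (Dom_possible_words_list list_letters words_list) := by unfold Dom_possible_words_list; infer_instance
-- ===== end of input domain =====

-- B replaces A's per-word scan over list_letters (with list.remove) by a letter-count
-- dictionary built once and one counting pass per word; return value proved identical.

-- ===== PORT A =====
def possible_words_list (list_letters : List String) (words_list : List String) : List String :=
  words_list.foldl (fun acc word =>
    -- word_letters = list(word): list of 1-character strings
    let word_letters : List String := word.toList.map (fun c => c.toString)
    -- for letter in list_letters: if letter in word_letters: word_letters.remove(letter)
    let word_letters := list_letters.foldl (fun ws letter =>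
      if letter ∈ ws then (PySem.List.remove? ws letter).getD ws else ws) word_letters
    if word_letters = [] then acc ++ [word]
    else if word_letters.length = 1 ∧ "?" ∈ list_letters then acc ++ [word]
    else acc) []

-- ===== PORT B =====
def possible_words_list_alt (list_letters : List String) (words_list : List String) : List String :=
  let avail := list_letters.foldl (fun d letter => d.insert letter (d.getD letter 0 + 1))
    (PySem.Dict.empty : PySem.Dict String Int)
  let joker := list_letters.contains "?"
  words_list.foldl (fun (result : List String) word =>
    -- remaining = dict(avail); uncovered = 0; single pass over the word's characters
    let st : PySem.Dict String Int × Int := word.toList.foldl (fun (st : PySem.Dict String Int × Int) c =>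
      let s := c.toString
      let r := st.1.getD s 0
      if r > 0 then (st.1.insert s (r - 1), st.2) else (st.1, st.2 + 1)) (avail, (0 : Int))
    if st.2 = 0 ∨ (st.2 = 1 ∧ joker) then result ++ [word] else result) []

-- ===== PRECONDITION & SPEC =====
def Spec_possible_words_list (list_letters : List String) (words_list : List String) (out : List String) : Prop := out = possible_words_list_alt list_letters words_list
instance (list_letters : List String) (words_list : List String) (out : List String) : Decidable (Spec_possible_words_list list_letters words_list out) := by unfold Spec_possible_words_list; infer_instance

-- ===== CLAIM (what is proved, stated in full; the proofs are below) =====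
def Claim_equal_possible_words_list : Prop := ∀ (list_letters : List String) (words_list : List String), Dom_possible_words_list list_letters words_list → Spec_possible_words_list list_letters words_list (possible_words_list list_letters words_list)

-- ===== LEMMAS AND PROOFS =====

-- (s ::ₘ q) - m absorbs s when m still has one
theorem pv_sub_cons_of_pos {q m : Multiset String} {s : String} (h : 0 < m.count s) :
    (s ::ₘ q) - m = q - m.erase s := by
  ext x
  by_cases hx : x = s
  · simp [Multiset.count_sub, hx, Multiset.count_erase_self]; omega
  · simp [Multiset.count_sub, hx, Multiset.count_erase_of_ne hx]

-- (s ::ₘ q) - m keeps s when m has none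
theorem pv_sub_cons_of_zero {q m : Multiset String} {s : String} (h : m.count s = 0) :
    (s ::ₘ q) - m = s ::ₘ (q - m) := by
  ext x
  by_cases hx : x = s
  · simp [Multiset.count_sub, hx, h]
  · simp [Multiset.count_sub, hx]

-- A's inner loop computes the multiset difference word_letters - list_letters
theorem pvA_fold_multiset (ls : List String) : ∀ ws : List String,
    ((ls.foldl (fun ws letter =>
      if letter ∈ ws then (PySem.List.remove? ws letter).getD ws else ws) ws : List String) : Multiset String)
      = (ws : Multiset String) - (ls : Multiset String) := by
  induction ls with
  | nil => intro ws; simp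
  | cons l ls ih =>
    intro ws
    rw [List.foldl_cons]
    by_cases h : l ∈ ws
    · rw [if_pos h, PySem.List.remove?_eq_some_erase ws l h, Option.getD_some, ih]
      rw [← Multiset.cons_coe, Multiset.sub_cons, Multiset.coe_erase]
    · rw [if_neg h, ih, ← Multiset.cons_coe, Multiset.sub_cons,
        Multiset.erase_of_notMem (by simpa using h)]

-- B's inner loop: the dict tracks the remaining counts, uncovered counts the deficit
theorem pvB_fold_core : ∀ (p : List Char) (d : PySem.Dict String Int) (u : Int) (m : Multiset String),
    (∀ s, d.getD s 0 = (m.count s : Int)) →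
    (p.foldl (fun (st : PySem.Dict String Int × Int) c =>
      let s := c.toString
      let r := st.1.getD s 0
      if r > 0 then (st.1.insert s (r - 1), st.2) else (st.1, st.2 + 1)) (d, u)).2
      = u + (Multiset.card (((p.map (fun c => c.toString)) : Multiset String) - m) : Int) := by
  intro p
  induction p with
  | nil => intro d u m hd; simp
  | cons c p ih =>
    intro d u m hd
    rw [List.foldl_cons]
    simp only []
    by_cases h : d.getD c.toString 0 > 0
    · rw [if_pos h]
      have hpos : 0 < m.count c.toString := by have := hd c.toString; omega
      have hd' : ∀ s, (d.insert c.toString (d.getD c.toString 0 - 1)).getD s 0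
          = ((m.erase c.toString).count s : Int) := by
        intro s
        rw [PySem.Dict.getD_insert]
        by_cases hs : s = c.toString
        · rw [if_pos hs, hd c.toString, hs, Multiset.count_erase_self]
          omega
        · rw [if_neg hs, hd s, Multiset.count_erase_of_ne hs]
      rw [ih _ u (m.erase c.toString) hd']
      rw [List.map_cons, ← Multiset.cons_coe, pv_sub_cons_of_pos hpos]
    · rw [if_neg h]
      have hzero : m.count c.toString = 0 := by have := hd c.toString; omega
      rw [ih _ (u + 1) m hd]
      rw [List.map_cons, ← Multiset.cons_coe, pv_sub_cons_of_zero hzero,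
        Multiset.card_cons]
      push_cast
      ring

-- avail's counts are list_letters' counts
theorem pv_avail_getD (ls : List String) (s : String) :
    (ls.foldl (fun d letter => d.insert letter (d.getD letter 0 + 1))
      (PySem.Dict.empty : PySem.Dict String Int)).getD s 0 = (ls.count s : Int) := by
  rw [PySem.Dict.getD_foldl_insert_add_one]
  simp [PySem.Dict.getD_empty]

-- per-word: A's body equals B's body
theorem pv_body_eq (list_letters : List String) (acc : List String) (word : String) :
    (let word_letters : List String := word.toList.map (fun c => c.toString)
     let word_letters := list_letters.foldl (fun ws letter =>
       if letter ∈ ws then (PySem.List.remove? ws letter).getD ws else ws) word_letters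
     if word_letters = [] then acc ++ [word]
     else if word_letters.length = 1 ∧ "?" ∈ list_letters then acc ++ [word]
     else acc)
    = (let avail := list_letters.foldl (fun d letter => d.insert letter (d.getD letter 0 + 1))
        (PySem.Dict.empty : PySem.Dict String Int)
       let st := word.toList.foldl (fun (st : PySem.Dict String Int × Int) c =>
         let s := c.toString
         let r := st.1.getD s 0
         if r > 0 then (st.1.insert s (r - 1), st.2) else (st.1, st.2 + 1)) (avail, (0 : Int))
       if st.2 = 0 ∨ (st.2 = 1 ∧ list_letters.contains "?") then acc ++ [word] else acc) := by
  have hB := pvB_fold_core word.toList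
    (list_letters.foldl (fun d letter => d.insert letter (d.getD letter 0 + 1))
      (PySem.Dict.empty : PySem.Dict String Int)) 0
    ((list_letters : Multiset String))
    (by intro s; rw [pv_avail_getD]; simp)
  have hA := pvA_fold_multiset list_letters (word.toList.map (fun c => c.toString))
  set rem := list_letters.foldl (fun ws letter =>
    if letter ∈ ws then (PySem.List.remove? ws letter).getD ws else ws)
    (word.toList.map (fun c => c.toString)) with hrem
  have hlen : rem.length
      = Multiset.card (((word.toList.map (fun c => c.toString)) : Multiset String)
        - (list_letters : Multiset String)) := by
    rw [← hA]; simp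
  simp only []
  rw [hB, zero_add, ← hlen]
  by_cases h0 : rem = []
  · rw [if_pos h0]
    have : rem.length = 0 := by simp [h0]
    rw [if_pos (Or.inl (by omega : ((rem.length : Int) = 0)))]
  · rw [if_neg h0]
    have hne : rem.length ≠ 0 := by simpa [List.length_eq_zero_iff] using h0
    by_cases h1 : rem.length = 1 ∧ "?" ∈ list_letters
    · rw [if_pos h1, if_pos (Or.inr ⟨by exact_mod_cast h1.1, by simpa using h1.2⟩)]
    · rw [if_neg h1, if_neg]
      rintro (hc | ⟨hc, hj⟩)
      · omega
      · exact h1 ⟨by exact_mod_cast hc, by simpa using hj⟩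

-- ===== VERDICT (by name: the statement is the Claim_ definition above) =====
theorem possible_words_list_spec : Claim_equal_possible_words_list := by
  intro list_letters words_list _
  unfold Spec_possible_words_list possible_words_list possible_words_list_alt
  simp only []
  exact PySem.List.foldl_congr_mem _ _ _ _ (fun acc word _ => pv_body_eq list_letters acc word)
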